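-- pv_equiv track=rewrite | github.com/valentinsoare/WithPython | relearningPy/scrambling_words/scramblingWords.py | locate_punctuation_and_save_and_remove_punctuation_from_word
-- ===== SOURCE A (Python) =====
-- from typing import List, AnyStr, Dict, Tuple
--
-- def locate_punctuation_and_save_and_remove_punctuation_from_word(given_word_from_input: str) -> Tuple:
--     punctuation_to_locate: AnyStr = '!"#$%&\'()*+,./:;<=>?[\]`{|}~'
--     word_after_punctuation: AnyStr = given_word_from_input.translate(str.maketrans('', '', punctuation_to_locate))
--     list_with_punctuation_location: List[Tuple[str, int]] = []
--
--     for i in range(len(given_word_from_input)):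
--         if given_word_from_input[i] in punctuation_to_locate and (0 <= i <= 2 or (len(given_word_from_input) - 3) <= i <= (len(given_word_from_input) - 1)):
--             list_with_punctuation_location.append((given_word_from_input[i], i))
--
--     return list(word_after_punctuation), list_with_punctuation_location
-- ===== SOURCE B (Python) =====
-- def locate_punctuation_and_save_and_remove_punctuation_from_word(given_word_from_input):
--     # One fused pass, traversed back-to-front with two accumulators, reversed at the end.
--     punctuation = frozenset('!"#$%&\'()*+,./:;<=>?[\\]`{|}~')
--     n = len(given_word_from_input)
--     cleaned_rev = []
--     locations_rev = []
--     for i in reversed(range(n)):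
--         c = given_word_from_input[i]
--         if c in punctuation:
--             if i <= 2 or n - 3 <= i:
--                 locations_rev.append((c, i))
--         else:
--             cleaned_rev.append(c)
--     cleaned_rev.reverse()
--     locations_rev.reverse()
--     return cleaned_rev, locations_rev
-- ===== Notes on version B (the rewrite author's own statement) =====
-- stated objective: alternative
-- what changed: B replaces A's two staged passes (translate-based deletion, then a forward scan of all indices with a position test) by one fused pass that walks the string back-to-front with two accumulators, builds both outputs in reverse and reverses them once at the end.
import Mathlib
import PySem

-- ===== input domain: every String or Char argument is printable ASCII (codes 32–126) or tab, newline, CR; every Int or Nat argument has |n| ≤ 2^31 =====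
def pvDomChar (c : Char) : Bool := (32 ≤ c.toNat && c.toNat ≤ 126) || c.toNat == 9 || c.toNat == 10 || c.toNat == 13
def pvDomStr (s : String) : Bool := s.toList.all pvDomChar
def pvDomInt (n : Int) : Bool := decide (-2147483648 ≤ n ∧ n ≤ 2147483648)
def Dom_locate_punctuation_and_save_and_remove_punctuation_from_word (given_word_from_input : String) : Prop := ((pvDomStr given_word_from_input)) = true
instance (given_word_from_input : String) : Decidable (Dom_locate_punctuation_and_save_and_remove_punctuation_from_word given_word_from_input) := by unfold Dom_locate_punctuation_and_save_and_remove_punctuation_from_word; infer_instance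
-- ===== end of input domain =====

-- ===== PORT A =====
-- B fuses A's two staged passes into one reverse-order pass with two accumulators, reversed at the end; same results.
def pvPunct : List Char := "!\"#$%&'()*+,./:;<=>?[\\]`{|}~".toList

def locate_punctuation_and_save_and_remove_punctuation_from_word (given_word_from_input : String) : List String × (List (String × Int)) :=
  let cs := given_word_from_input.toList
  let n := cs.length
  -- translate(maketrans('', '', punct)) deletes the punctuation characters; list(...) splits into 1-char strings
  let word_after_punctuation := (cs.filter (fun c => !pvPunct.contains c)).map (fun c => String.ofList [c])
  -- for i in range(len(...)): if s[i] in punct and (0 <= i <= 2 or n-3 <= i <= n-1): append((s[i], i))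
  let list_with_punctuation_location := (List.range n).foldl (fun acc i =>
    if pvPunct.contains (cs.getD i ' ') && (decide (i ≤ 2) || decide (n ≤ i + 3)) then
      acc ++ [(String.ofList [cs.getD i ' '], (i : Int))]
    else acc) []
  (word_after_punctuation, list_with_punctuation_location)

-- ===== PORT B =====
-- the loop body of B's single fused pass (updates both accumulators for index i)
def pvStepB (cs : List Char) (n : Nat) (acc : List String × List (String × Int)) (i : Nat) : List String × List (String × Int) :=
  let c := cs.getD i ' '
  if pvPunct.contains c then
    if decide (i ≤ 2) || decide (n ≤ i + 3) then
      (acc.1, acc.2 ++ [(String.ofList [c], (i : Int))])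
    else acc
  else (acc.1 ++ [String.ofList [c]], acc.2)

def locate_punctuation_and_save_and_remove_punctuation_from_word_alt (given_word_from_input : String) : List String × (List (String × Int)) :=
  let cs := given_word_from_input.toList
  let n := cs.length
  -- for i in reversed(range(n)): one fused pass, two accumulators, built in reverse
  let res := ((List.range n).reverse).foldl (pvStepB cs n) ([], [])
  (res.1.reverse, res.2.reverse)

-- ===== PRECONDITION & SPEC =====
def Spec_locate_punctuation_and_save_and_remove_punctuation_from_word (given_word_from_input : String) (out : List String × (List (String × Int))) : Prop := out = locate_punctuation_and_save_and_remove_punctuation_from_word_alt given_word_from_input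
instance (given_word_from_input : String) (out : List String × (List (String × Int))) : Decidable (Spec_locate_punctuation_and_save_and_remove_punctuation_from_word given_word_from_input out) := by unfold Spec_locate_punctuation_and_save_and_remove_punctuation_from_word; infer_instance

-- ===== CLAIM =====
def Claim_equal_locate_punctuation_and_save_and_remove_punctuation_from_word : Prop := ∀ (given_word_from_input : String), Dom_locate_punctuation_and_save_and_remove_punctuation_from_word given_word_from_input → Spec_locate_punctuation_and_save_and_remove_punctuation_from_word given_word_from_input (locate_punctuation_and_save_and_remove_punctuation_from_word given_word_from_input)

-- ===== LEMMAS AND PROOFS =====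

-- the fused pair-fold splits into two independent folds
theorem pv_foldl_split (cs : List Char) (n : Nat) (l : List Nat) (a : List String) (b : List (String × Int)) :
    l.foldl (pvStepB cs n) (a, b)
      = (l.foldl (fun a i => if !pvPunct.contains (cs.getD i ' ') then a ++ [String.ofList [cs.getD i ' ']] else a) a,
         l.foldl (fun b i => if pvPunct.contains (cs.getD i ' ') && (decide (i ≤ 2) || decide (n ≤ i + 3)) then
            b ++ [(String.ofList [cs.getD i ' '], (i : Int))] else b) b) := by
  induction l generalizing a b with
  | nil => rfl
  | cons x t ih =>
    have hstep : ∀ (a : List String) (b : List (String × Int)),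
        pvStepB cs n (a, b) x
          = ((if !pvPunct.contains (cs.getD x ' ') then a ++ [String.ofList [cs.getD x ' ']] else a),
             (if pvPunct.contains (cs.getD x ' ') && (decide (x ≤ 2) || decide (n ≤ x + 3)) then
                b ++ [(String.ofList [cs.getD x ' '], (x : Int))] else b)) := by
      intro a b
      cases hc : pvPunct.contains (cs.getD x ' ') <;>
        cases hb : (decide (x ≤ 2) || decide (n ≤ x + 3)) <;>
        simp_all [pvStepB]
    simp only [List.foldl_cons, hstep]
    exact ih _ _

-- filtering characters equals filtering their indices
theorem pv_filter_index (cs : List Char) (p : Char → Bool) (f : Char → String) :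
    ((List.range cs.length).filter (fun i => p (cs.getD i ' '))).map (fun i => f (cs.getD i ' '))
      = (cs.filter p).map f := by
  induction cs with
  | nil => rfl
  | cons c t ih =>
    by_cases h : p c = true <;>
      (simp [List.range_succ_eq_map, List.filter_map, List.map_map, Function.comp_def, h]
       <;> simpa using ih)

theorem locate_spec_aux (s : String) :
    locate_punctuation_and_save_and_remove_punctuation_from_word s
      = locate_punctuation_and_save_and_remove_punctuation_from_word_alt s := by
  unfold locate_punctuation_and_save_and_remove_punctuation_from_word
    locate_punctuation_and_save_and_remove_punctuation_from_word_alt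
  simp only [pv_foldl_split, PySem.List.foldl_append_if, List.nil_append, List.filter_reverse,
    List.map_reverse, List.reverse_reverse]
  refine Prod.ext ?_ ?_
  · exact (pv_filter_index s.toList (fun c => !pvPunct.contains c) (fun c => String.ofList [c])).symm
  · rfl

-- ===== VERDICT =====
theorem locate_punctuation_and_save_and_remove_punctuation_from_word_spec : Claim_equal_locate_punctuation_and_save_and_remove_punctuation_from_word := by
  intro s _
  unfold Spec_locate_punctuation_and_save_and_remove_punctuation_from_word
  exact locate_spec_aux s
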